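-- pv_equiv track=rewrite | github.com/miliar/Code_Jam_Webscraper | solutions_python/Problem_178/1007.py | solve
-- ===== SOURCE A (Python) =====
-- def solve(s, sign):
--
--     actions = 0
--
--     if s:
--         if s[-1] == sign:
--             actions = solve(s[:-1], '+' if sign == '+' else '-')
--         else:
--             actions = solve(s[:-1], '+' if sign == '-' else '-') + 1
--
--     return actions
-- ===== SOURCE B (Python) =====
-- def solve(s, sign):
--     actions = 0
--     for ch in reversed(s):
--         if ch == sign:
--             sign = '+' if sign == '+' else '-'
--         else:
--             sign = '+' if sign == '-' else '-'
--             actions += 1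
--     return actions
-- ===== Notes on version B (the rewrite author's own statement) =====
-- stated objective: faster
-- what changed: Replaced the O(n^2) recursion that copies s[:-1] at every step with a single iterative right-to-left pass keeping (count, current sign) as loop state.
import Mathlib
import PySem

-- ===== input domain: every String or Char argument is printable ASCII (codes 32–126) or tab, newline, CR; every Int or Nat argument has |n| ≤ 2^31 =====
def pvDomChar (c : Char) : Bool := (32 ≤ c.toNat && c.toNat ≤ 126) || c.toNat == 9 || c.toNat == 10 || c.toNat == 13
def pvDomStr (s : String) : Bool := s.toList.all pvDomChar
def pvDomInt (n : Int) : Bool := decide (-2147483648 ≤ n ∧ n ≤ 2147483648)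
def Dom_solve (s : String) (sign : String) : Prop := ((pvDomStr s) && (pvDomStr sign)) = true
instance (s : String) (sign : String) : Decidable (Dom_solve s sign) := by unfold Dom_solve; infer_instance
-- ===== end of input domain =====

-- B replaces A's O(n^2) recursion (which copies s[:-1] each step) by one linear
-- right-to-left fold over the characters; exact same return value, proven below.
-- ===== PORT A =====
-- A recurses on s[:-1] examining s[-1]; ported as recursion on List Char via
-- getLast?/dropLast (s[-1] on a non-empty string is its last character).
def solveAAux (l : List Char) (sign : String) : Int :=
  match h : l.getLast? with
  | none => 0
  | some c =>
    if String.mk [c] = sign then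
      solveAAux l.dropLast (if sign = "+" then "+" else "-")
    else
      solveAAux l.dropLast (if sign = "-" then "+" else "-") + 1
termination_by l.length
decreasing_by
  all_goals
    have hne : l ≠ [] := by intro he; subst he; simp at h
    have hp : 0 < l.length := List.length_pos_iff.mpr hne
    simp [List.length_dropLast]
    omega

def solve (s : String) (sign : String) : Int := solveAAux s.toList sign

-- ===== PORT B =====
-- one pass over reversed(s), state = (actions, current sign)
def solveBStep (st : Int × String) (c : Char) : Int × String :=
  if String.mk [c] = st.2 then (st.1, if st.2 = "+" then "+" else "-")
  else (st.1 + 1, if st.2 = "-" then "+" else "-")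

def solve_alt (s : String) (sign : String) : Int :=
  (s.toList.reverse.foldl solveBStep ((0 : Int), sign)).1

-- ===== PRECONDITION & SPEC =====
def Spec_solve (s : String) (sign : String) (out : Int) : Prop := out = solve_alt s sign
instance (s : String) (sign : String) (out : Int) : Decidable (Spec_solve s sign out) := by unfold Spec_solve; infer_instance

-- ===== CLAIM (what is proved, stated in full; the proofs are below) =====
def Claim_equal_solve : Prop := ∀ (s : String) (sign : String), Dom_solve s sign → Spec_solve s sign (solve s sign)

-- ===== LEMMAS AND PROOFS =====

-- ===== VERDICT (by name: the statement is the Claim_ definition above) =====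
theorem solveAAux_concat (l : List Char) (c : Char) (sign : String) :
    solveAAux (l ++ [c]) sign =
      (if String.mk [c] = sign then
        solveAAux l (if sign = "+" then "+" else "-")
      else
        solveAAux l (if sign = "-" then "+" else "-") + 1) := by
  rw [solveAAux]
  split
  · rename_i h; simp at h
  · rename_i c' h
    simp only [List.getLast?_concat, Option.some.injEq] at h
    subst h
    simp

theorem solveAAux_fold (l : List Char) : ∀ (sign : String) (a : Int),
    (l.reverse.foldl solveBStep (a, sign)).1 = a + solveAAux l sign := by
  induction l using List.reverseRecOn with
  | nil => intro sign a; simp [solveAAux]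
  | append_singleton l c ih =>
    intro sign a
    rw [solveAAux_concat]
    simp only [List.reverse_append, List.reverse_singleton, List.singleton_append,
      List.foldl_cons, solveBStep]
    split_ifs with h1 <;> rw [ih] <;> omega

theorem solve_spec : Claim_equal_solve := by
  intro s sign _
  unfold Spec_solve solve solve_alt
  rw [solveAAux_fold]
  omega
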